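-- pv_equiv track=rewrite | github.com/yishaiar/InsuranceHebrewRAG-Assistant | app/pdf_reader/__init__.py | get_word_position
-- ===== SOURCE A (Python) =====
-- def get_word_position(text):
--     # word_position = {}
--     start_word = {}
--     word_num = 0
--     # split the text into lines and get the position of the first word in each line
--     for line_num,line in enumerate(text.split('\n')):
--         start_word[word_num] =  line_num
--         for word in line.split(' '):
--             # word_position[word_num] = line_num
--             word_num+=1
--     return start_word#,word_position
-- ===== SOURCE B (Python) =====
-- def get_word_position(text):
--     # Per-line word counts, then prefix-sum start offsets, then one comprehension.
--     counts = [len(line.split(' ')) for line in text.split('\n')]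
--     offsets = [0]
--     for c in counts[:-1]:
--         offsets.append(offsets[-1] + c)
--     return {off: line_num for line_num, off in enumerate(offsets)}
-- ===== Notes on version B (the rewrite author's own statement) =====
-- stated objective: alternative
-- what changed: Replaces the nested loop with a mutated word_num counter and dict by three declarative passes: per-line word counts, prefix-sum start offsets, and a single dict comprehension over enumerate(offsets).
import Mathlib
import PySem

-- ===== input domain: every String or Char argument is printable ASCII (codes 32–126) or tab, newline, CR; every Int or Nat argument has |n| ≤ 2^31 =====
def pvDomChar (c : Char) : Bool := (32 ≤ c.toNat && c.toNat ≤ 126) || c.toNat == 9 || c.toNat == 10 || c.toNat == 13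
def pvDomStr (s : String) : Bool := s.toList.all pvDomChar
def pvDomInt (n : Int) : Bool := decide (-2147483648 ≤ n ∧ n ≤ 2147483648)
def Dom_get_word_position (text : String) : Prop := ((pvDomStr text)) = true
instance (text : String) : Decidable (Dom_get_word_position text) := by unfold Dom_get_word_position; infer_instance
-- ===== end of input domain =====

-- B replaces A's nested loop over words (mutating word_num and a dict) by per-line word
-- counts, prefix-sum start offsets and a single dict comprehension: same cost, declarative decomposition.

-- ===== PORT A =====
-- A: nested loop; word_num counts words seen so far, start_word[word_num] = line_num at each line start.
def get_word_position (text : String) : List (Int × Int) :=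
  let lines := (PySem.Str.split? text "\n").getD []   -- sep "\n" ≠ "": split? is always some here
  let st := (PySem.List.enumerate lines).foldl
    (fun (st : PySem.Dict Int Int × Int) (p : Int × String) =>
      let d := st.1.insert st.2 p.1
      let w := ((PySem.Str.split? p.2 " ").getD []).foldl (fun (w : Int) _ => w + 1) st.2
      (d, w))
    (PySem.Dict.empty, 0)
  st.1.items

-- ===== PORT B =====
-- B: counts = [len(line.split(' ')) for line in text.split('\n')]; prefix-sum offsets; comprehension.
def get_word_position_alt (text : String) : List (Int × Int) :=
  let counts : List Int :=
    ((PySem.Str.split? text "\n").getD []).map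
      (fun line => (((PySem.Str.split? line " ").getD []).length : Int))
  let offsets : List Int :=
    (PySem.List.slice counts none (some (-1))).foldl
      (fun (acc : List Int) c => acc ++ [PySem.List.pyGetD acc (-1) 0 + c]) [0]
  ((PySem.List.enumerate offsets).foldl
      (fun (d : PySem.Dict Int Int) (p : Int × Int) => d.insert p.2 p.1)
      PySem.Dict.empty).items

-- ===== PRECONDITION & SPEC =====
def Spec_get_word_position (text : String) (out : List (Int × Int)) : Prop := out = get_word_position_alt text
instance (text : String) (out : List (Int × Int)) : Decidable (Spec_get_word_position text out) := by unfold Spec_get_word_position; infer_instance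

-- ===== CLAIM (what is proved, stated in full; the proofs are below) =====
def Claim_equal_get_word_position : Prop := ∀ (text : String), Dom_get_word_position text → Spec_get_word_position text (get_word_position text)

-- ===== LEMMAS AND PROOFS =====

-- splitOn.go always produces at least one piece
theorem pvGoNeNil (sep : List Char) (fuel : Nat) :
    ∀ (l cur : List Char) (acc : List (List Char)), PySem.Chars.splitOn.go sep fuel l cur acc ≠ [] := by
  induction fuel with
  | zero => intro l cur acc; simp [PySem.Chars.splitOn.go]
  | succ f ih =>
    intro l cur acc
    cases l with
    | nil => simp [PySem.Chars.splitOn.go]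
    | cons c rest =>
      rw [PySem.Chars.splitOn.go]
      split
      · exact ih _ _ _
      · exact ih _ _ _

-- s.split(sep) with sep ≠ "" returns a nonempty list
theorem pvSplitNeNil (s sep : String) (h : sep.toList ≠ []) :
    (PySem.Str.split? s sep).getD [] ≠ [] := by
  have h2 := PySem.Str.split?_map s sep
  have h3 : PySem.Chars.split? s.toList sep.toList
      = some (PySem.Chars.splitOn s.toList sep.toList) := by
    simp [PySem.Chars.split?, h]
  rw [h3] at h2
  cases hs : PySem.Str.split? s sep with
  | none => rw [hs] at h2; simp at h2
  | some ls =>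
    rw [hs] at h2
    simp only [Option.map_some, Option.some_inj] at h2
    intro hnil
    simp only [Option.getD_some] at hnil
    subst hnil
    simp at h2
    unfold PySem.Chars.splitOn at h2
    exact pvGoNeNil _ _ _ _ _ h2

-- word count of a line, as both ports compute it
def pvCnt (line : String) : Int := (((PySem.Str.split? line " ").getD []).length : Int)

theorem pvCnt_pos (line : String) : 1 ≤ pvCnt line := by
  unfold pvCnt
  have h := pvSplitNeNil line " " (by decide)
  cases hl : (PySem.Str.split? line " ").getD [] with
  | nil => exact absurd hl h
  | cons a l => simp

-- the (start offset, line number) pairs determined by a list of word counts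
def pvPairs : List Int → Int → Int → List (Int × Int)
  | [], _, _ => []
  | c :: cs, n, w => (w, n) :: pvPairs cs (n + 1) (w + c)

-- the prefix-sum offsets B appends after the initial 0
def pvOffs : List Int → Int → List Int
  | [], _ => []
  | c :: cs, w => (w + c) :: pvOffs cs (w + c)

theorem pvFoldlLen (l : List String) (w : Int) :
    l.foldl (fun (w : Int) _ => w + 1) w = w + l.length := by
  induction l generalizing w with
  | nil => simp
  | cons a l ih => simp [List.foldl_cons, ih]; omega

-- A's loop, characterised: it appends pvPairs to the dict's items
theorem pvAloop (ls : List String) : ∀ (n w : Int) (d : PySem.Dict Int Int),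
    (∀ k ∈ d.keys, k < w) →
    ((PySem.List.enumerate ls n).foldl
      (fun (st : PySem.Dict Int Int × Int) (p : Int × String) =>
        (st.1.insert st.2 p.1, st.2 + (((PySem.Str.split? p.2 " ").getD []).length : Int)))
      (d, w)).1.items = d.items ++ pvPairs (ls.map pvCnt) n w := by
  induction ls with
  | nil => intro n w d _; simp [PySem.List.enumerate_nil, pvPairs]
  | cons l ls ih =>
    intro n w d h
    have hc : d.contains w = false := by
      cases hx : d.contains w with
      | false => rfl
      | true => exact absurd (h w ((PySem.Dict.contains_iff_mem_keys d w).mp hx)) (lt_irrefl w)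
    rw [PySem.List.enumerate_cons, List.foldl_cons]
    rw [ih (n + 1) (w + ((PySem.Str.split? l " ").getD []).length) (d.insert w n) ?_]
    · rw [PySem.Dict.items_insert_of_not_contains _ n hc]
      simp [pvPairs, pvCnt]
    · intro k hk
      rcases (PySem.Dict.mem_keys_insert _ _ _ _).mp hk with h1 | h1
      · subst h1
        have := pvCnt_pos l
        unfold pvCnt at this
        omega
      · have := h k h1
        have := pvCnt_pos l
        unfold pvCnt at this
        omega

-- B's prefix-sum loop, characterised
theorem pvBloop (cs : List Int) : ∀ (ys : List Int) (w : Int),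
    cs.foldl (fun (acc : List Int) c => acc ++ [PySem.List.pyGetD acc (-1) 0 + c]) (ys ++ [w])
      = ys ++ w :: pvOffs cs w := by
  induction cs with
  | nil => intro ys w; simp [pvOffs]
  | cons c cs ih =>
    intro ys w
    rw [List.foldl_cons]
    have hlast : PySem.List.pyGetD (ys ++ [w]) (-1) 0 = w := by simp [pysem]
    rw [hlast]
    have : ys ++ [w] ++ [w + c] = (ys ++ [w]) ++ [w + c] := rfl
    rw [this, ih (ys ++ [w]) (w + c)]
    simp [pvOffs]

-- every entry of pvOffs cs w exceeds w, when all counts are ≥ 1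
theorem pvOffsLt (cs : List Int) : ∀ (w x : Int), (∀ c ∈ cs, 1 ≤ c) → x ∈ pvOffs cs w → w < x := by
  induction cs with
  | nil => intro w x _ hx; simp [pvOffs] at hx
  | cons c cs ih =>
    intro w x h hx
    simp only [pvOffs, List.mem_cons] at hx
    rcases hx with hx | hx
    · have := h c (by simp); omega
    · have := ih (w + c) x (fun c hc => h c (by simp [hc])) hx
      have := h c (by simp)
      omega

theorem pvOffsPairwise (cs : List Int) : ∀ (w : Int), (∀ c ∈ cs, 1 ≤ c) →
    List.Pairwise (· < ·) (w :: pvOffs cs w) := by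
  induction cs with
  | nil => intro w _; simp [pvOffs]
  | cons c cs ih =>
    intro w h
    have hgen := ih (w + c) (fun c hc => h c (by simp [hc]))
    simp only [pvOffs]
    constructor
    · intro x hx
      simp only [List.mem_cons] at hx
      rcases hx with hx | hx
      · have := h c (by simp); omega
      · have := pvOffsLt cs (w + c) x (fun c hc => h c (by simp [hc])) hx
        have := h c (by simp); omega
    · exact hgen

-- enumerating the offsets and swapping gives exactly pvPairs (the last count is unused)
theorem pvEnumOffs (cs : List Int) : ∀ (x n w : Int),
    (PySem.List.enumerate (w :: pvOffs cs w) n).map (fun p => (p.2, p.1))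
      = pvPairs (cs ++ [x]) n w := by
  induction cs with
  | nil => intro x n w; simp [pvOffs, pvPairs, PySem.List.enumerate_cons, PySem.List.enumerate_nil]
  | cons c cs ih =>
    intro x n w
    rw [show pvOffs (c :: cs) w = (w + c) :: pvOffs cs (w + c) from rfl,
        PySem.List.enumerate_cons, List.map_cons, ih x (n + 1) (w + c)]
    simp [pvPairs]

-- ===== VERDICT (by name: the statement is the Claim_ definition above) =====
theorem get_word_position_spec : Claim_equal_get_word_position := by
  intro text _
  unfold Spec_get_word_position
  simp only [get_word_position, get_word_position_alt, pvFoldlLen]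
  set lines := (PySem.Str.split? text "\n").getD [] with hlines
  have hln : lines ≠ [] := pvSplitNeNil text "\n" (by decide)
  set cs : List Int := lines.map pvCnt with hcs
  have hcsn : cs ≠ [] := by
    intro h; exact hln (List.map_eq_nil_iff.mp h)
  have hcnt1 : ∀ c ∈ cs, 1 ≤ c := by
    intro c hc
    rw [hcs] at hc
    rcases List.mem_map.mp hc with ⟨l, _, rfl⟩
    exact pvCnt_pos l
  have hcounts : lines.map (fun line => (((PySem.Str.split? line " ").getD []).length : Int)) = cs := by
    rw [hcs]; rfl
  have hslice : PySem.List.slice cs none (some (-1)) = cs.dropLast := by simp [pysem]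
  have hBoff : (cs.dropLast).foldl
      (fun (acc : List Int) c => acc ++ [PySem.List.pyGetD acc (-1) 0 + c]) [0]
      = (0 : Int) :: pvOffs cs.dropLast 0 := by
    have := pvBloop cs.dropLast [] 0
    simpa using this
  have hnodup : ((PySem.List.enumerate ((0 : Int) :: pvOffs cs.dropLast 0) 0).map (fun p : Int × Int => p.2)).Nodup := by
    rw [PySem.List.map_snd_enumerate]
    exact (pvOffsPairwise cs.dropLast 0
      (fun c hc => hcnt1 c (List.dropLast_subset _ hc))).imp (fun h => by omega)
  have hB : (((PySem.List.enumerate ((0 : Int) :: pvOffs cs.dropLast 0) 0).foldl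
      (fun (d : PySem.Dict Int Int) (p : Int × Int) => d.insert p.2 p.1)
      PySem.Dict.empty).items)
      = (PySem.List.enumerate ((0 : Int) :: pvOffs cs.dropLast 0) 0).map (fun p => (p.2, p.1)) := by
    have := PySem.Dict.items_foldl_insert_fresh
      (l := PySem.List.enumerate ((0 : Int) :: pvOffs cs.dropLast 0) 0)
      (k := fun p : Int × Int => p.2) (v := fun p : Int × Int => p.1)
      (d := PySem.Dict.empty) (by intro a _; simp) hnodup
    simpa using this
  have hfin : (PySem.List.enumerate ((0 : Int) :: pvOffs cs.dropLast 0) 0).map (fun p => (p.2, p.1))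
      = pvPairs cs 0 0 := by
    rw [pvEnumOffs cs.dropLast (cs.getLast hcsn) 0 0]
    rw [List.dropLast_append_getLast hcsn]
  rw [pvAloop lines 0 0 PySem.Dict.empty (by simp), hcounts, hslice, hBoff, hB, hfin]
  rw [← hcs]
  rw [show PySem.Dict.empty.items = ([] : List (Int × Int)) from rfl, List.nil_append]
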